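-- pv_equiv track=rewrite | github.com/microsoft/restler-fuzzer | restler/engine/fuzzing_parameters/fuzzing_utils.py | get_product_linear_fair
-- ===== SOURCE A (Python) =====
-- def get_product_linear_fair(sets, bound):
--     """ Return the product of the input sets (1-D combinatorial) in
--     breadth-first order.
--
--     @param sets: Input sets
--     @type  sets: List
--     @param bound: Max number of the product
--     @type  bound: Int
--
--     @return: Product (partial) of the input sets
--     @rtype:  List
--
--     """
--     for s in sets:
--         if not s:
--             return []
--
--     product = [[s[0] for s in sets]]
--     cnt = 1
--
--     ptrs = [1] * len(sets)
--
--     while (cnt < bound) or (bound < 0):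
--         done = True
--
--         for idx, si in enumerate(sets):
--             # pre
--             pre = [s[0] for s in sets[:idx]]
--             # post
--             post = [s[0] for s in sets[idx + 1:]]
--             # pivot
--             if ptrs[idx] < len(si):
--                 pivot = si[ptrs[idx]]
--                 ptrs[idx] += 1
--                 cnt += 1
--                 product.append(pre + [pivot] + post)
--
--             if ptrs[idx] < len(si):
--                 done = False
--
--         if done:
--             break
--
--     if (bound > 0) and (len(product) > bound):
--         return product[:bound]
--
--     return product
-- ===== SOURCE B (Python) =====
-- def get_product_linear_fair(sets, bound):
--     for s in sets:
--         if not s: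
--             return []
--     base = [s[0] for s in sets]
--     # all (round, index) coordinates, gathered per set, then ordered breadth-first
--     keyed = [(r, idx) for idx, s in enumerate(sets) for r in range(1, len(s))]
--     keyed.sort()
--     limit = len(keyed) if bound < 0 else max(bound - 1, 0)
--     rows = [base]
--     for r, idx in keyed[:limit]:
--         row = base.copy()
--         row[idx] = sets[idx][r]
--         rows.append(row)
--     return rows
-- ===== Notes on version B (the rewrite author's own statement) =====
-- stated objective: faster
-- what changed: B abandons A's round-scanning while-loop (pointer array, per-set slice rebuilding of pre/post on every pass) for a flatten-and-sort pipeline: it lists every (round, index) coordinate once per set, sorts the pairs lexicographically into breadth-first order, truncates to the bound, and only then materialises each row by copying the base row with one element replaced.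
import Mathlib
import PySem

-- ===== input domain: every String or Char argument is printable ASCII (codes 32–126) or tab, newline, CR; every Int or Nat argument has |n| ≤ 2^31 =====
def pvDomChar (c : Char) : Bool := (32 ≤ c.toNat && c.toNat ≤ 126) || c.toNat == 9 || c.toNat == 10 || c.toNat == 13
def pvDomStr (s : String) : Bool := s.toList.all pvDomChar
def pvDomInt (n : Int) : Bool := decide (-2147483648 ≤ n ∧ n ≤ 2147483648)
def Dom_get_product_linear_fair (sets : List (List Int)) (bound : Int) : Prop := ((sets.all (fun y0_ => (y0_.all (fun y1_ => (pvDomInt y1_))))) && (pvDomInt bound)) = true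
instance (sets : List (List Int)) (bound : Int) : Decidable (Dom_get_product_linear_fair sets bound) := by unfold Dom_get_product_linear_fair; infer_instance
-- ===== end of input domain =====

-- B replaces A's round-scanning while-loop (which rebuilds every row from two fresh list
-- slices per set per round) by a flatten-and-sort pipeline: it lists every (round, index)
-- coordinate once per set, sorts the coordinate pairs lexicographically into breadth-first
-- order, truncates to the bound, and only then materialises the rows (objective: faster).

-- ===== PORT A =====
-- one pass of Python's inner `for idx, si in enumerate(sets)` loop; state (product, cnt, ptrs-suffix, done)
def pvARound (sets : List (List Int)) :
    List (List Int) → List Nat → Nat → List (List Int) → Int → Bool →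
    (List (List Int) × Int × List Nat × Bool)
  | [], _, _, product, cnt, done => (product, cnt, [], done)
  | _ :: _, [], _, product, cnt, done => (product, cnt, [], done)   -- unreachable: ptrs has the same length as sets
  | si :: rem, p :: ps, idx, product, cnt, done =>
      let pre := (sets.take idx).map (fun s => s.headD 0)
      let post := (sets.drop (idx + 1)).map (fun s => s.headD 0)
      let st :=
        if p < si.length then
          (product ++ [pre ++ [si.getD p 0] ++ post], cnt + 1, p + 1)
        else (product, cnt, p)
      let done' := if st.2.2 < si.length then false else done
      let rest := pvARound sets rem ps (idx + 1) st.1 st.2.1 done'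
      (rest.1, rest.2.1, st.2.2 :: rest.2.2.1, rest.2.2.2)

-- Python's `while (cnt < bound) or (bound < 0)` loop; fuel bounds the number of rounds
-- (each continued round strictly advances some pointer, so total-length + 1 rounds suffice)
def pvALoop (sets : List (List Int)) (bound : Int) :
    Nat → List (List Int) → Int → List Nat → List (List Int)
  | 0, product, _, _ => product
  | fuel + 1, product, cnt, ptrs =>
      if cnt < bound ∨ bound < 0 then
        let st := pvARound sets sets ptrs 0 product cnt true
        if st.2.2.2 then st.1
        else pvALoop sets bound fuel st.1 st.2.1 st.2.2.1
      else product

def get_product_linear_fair (sets : List (List Int)) (bound : Int) : List (List Int) :=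
  if sets.any (fun s => s.isEmpty) then []
  else
    let product := [sets.map (fun s => s.headD 0)]
    let cnt : Int := 1
    let ptrs : List Nat := sets.map (fun _ => 1)
    let fuel := sets.foldl (fun a s => a + s.length) 0 + 1
    let product := pvALoop sets bound fuel product cnt ptrs
    if bound > 0 ∧ (product.length : Int) > bound then product.take bound.toNat
    else product

-- ===== PORT B =====
def get_product_linear_fair_alt (sets : List (List Int)) (bound : Int) : List (List Int) :=
  if sets.any (fun s => s.isEmpty) then []
  else
    let base := sets.map (fun s => s.headD 0)
    -- all (round, index) coordinates, gathered per set, then ordered breadth-first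
    let keyed := sets.zipIdx.flatMap (fun si =>
      ((List.range si.1.length).drop 1).map (fun r => (r, si.2)))
    let skeyed := PySem.List.sorted2 keyed (fun t => t.1) (fun t => t.2)
    let limit := if bound < 0 then skeyed.length else (bound - 1).toNat
    (skeyed.take limit).foldl
      (fun rows t => rows ++ [base.set t.2 ((sets.getD t.2 []).getD t.1 0)]) [base]

-- ===== PRECONDITION & SPEC =====
def Spec_get_product_linear_fair (sets : List (List Int)) (bound : Int) (out : List (List Int)) : Prop := out = get_product_linear_fair_alt sets bound
instance (sets : List (List Int)) (bound : Int) (out : List (List Int)) : Decidable (Spec_get_product_linear_fair sets bound out) := by unfold Spec_get_product_linear_fair; infer_instance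

-- ===== CLAIM (what is proved, stated in full; the proofs are below) =====
def Claim_equal_get_product_linear_fair : Prop := ∀ (sets : List (List Int)) (bound : Int), Dom_get_product_linear_fair sets bound → Spec_get_product_linear_fair sets bound (get_product_linear_fair sets bound)

-- ===== LEMMAS AND PROOFS =====

def pvRows (sets : List (List Int)) (r : Nat) (k : Nat) : List (List Int) :=
  ((sets.drop k).zipIdx k).filterMap (fun si =>
    if r < si.1.length then
      some ((sets.map (fun s => s.headD 0)).set si.2 (si.1.getD r 0)) else none)
def pvRowOf (sets : List (List Int)) (t : Nat × Nat) : List Int :=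
  (sets.map (fun s => s.headD 0)).set t.2 ((sets.getD t.2 []).getD t.1 0)
def pvRKeys (sets : List (List Int)) (r : Nat) : List (Nat × Nat) :=
  sets.zipIdx.filterMap (fun si => if r < si.1.length then some (r, si.2) else none)

lemma pv_rows_eq_map (sets : List (List Int)) (r : Nat) :
    pvRows sets r 0 = (pvRKeys sets r).map (pvRowOf sets) := by
  rw [pvRows, pvRKeys, List.map_filterMap, List.drop_zero]
  apply List.filterMap_congr
  intro si hsi
  have h1 : sets[si.2]? = some si.1 := List.mem_zipIdx_iff_getElem?.1 (by simpa using hsi)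
  have h2 : sets.getD si.2 [] = si.1 := by rw [List.getD_eq_getElem?_getD, h1]; rfl
  by_cases h : r < si.1.length
  · simp [h, pvRowOf, h1]
  · simp [h]

lemma pv_zipIdx_pairwise {α : Type} (xs : List α) :
    ∀ k, (xs.zipIdx k).Pairwise (fun a b => a.2 < b.2) := by
  induction xs with
  | nil => intro k; simp
  | cons x xs ih =>
    intro k
    rw [List.zipIdx_cons, List.pairwise_cons]
    refine ⟨?_, ih (k+1)⟩
    intro b hb
    have := (List.mem_zipIdx (x := b.1) (i := b.2) (xs := xs) (k := k+1) (by simpa using hb)).1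
    simpa using by omega

lemma pv_mem_rkeys (sets : List (List Int)) (r : Nat) (t : Nat × Nat) :
    t ∈ pvRKeys sets r ↔ t.1 = r ∧ t.2 < sets.length ∧ r < (sets.getD t.2 []).length := by
  rw [pvRKeys, List.mem_filterMap]
  constructor
  · rintro ⟨si, hsi, hif⟩
    by_cases h : r < si.1.length
    · simp only [h, if_true, Option.some.injEq] at hif
      subst hif
      have h1 : sets[si.2]? = some si.1 := List.mem_zipIdx_iff_getElem?.1 hsi
      have h2 : sets.getD si.2 [] = si.1 := by rw [List.getD_eq_getElem?_getD, h1]; rfl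
      have h3 : si.2 < sets.length := by
        rcases List.getElem?_eq_some_iff.1 h1 with ⟨h, _⟩; exact h
      exact ⟨rfl, h3, by rw [h2]; exact h⟩
    · simp [h] at hif
  · rintro ⟨ht1, ht2, ht3⟩
    refine ⟨(sets[t.2]'ht2, t.2), ?_, ?_⟩
    · exact List.mem_zipIdx_iff_getElem?.2 (by simp)
    · have h2 : sets.getD t.2 [] = sets[t.2]'ht2 := by
        rw [List.getD_eq_getElem?_getD, List.getElem?_eq_getElem ht2]; rfl
      rw [h2] at ht3
      simp only [ht3, if_true]
      cases t; simp_all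

def pvKeys (sets : List (List Int)) : Nat → Nat → List (Nat × Nat)
  | 0, _ => []
  | f + 1, r => pvRKeys sets r ++ pvKeys sets f (r + 1)
def pvTail (sets : List (List Int)) : Nat → Nat → List (List Int)
  | 0, _ => []
  | f + 1, r => pvRows sets r 0 ++ pvTail sets f (r + 1)
def pvFlatKeys (sets : List (List Int)) : List (Nat × Nat) :=
  sets.zipIdx.flatMap (fun si => ((List.range si.1.length).drop 1).map (fun r => (r, si.2)))
def pvLt (a b : Nat × Nat) : Prop := a.1 < b.1 ∨ (a.1 = b.1 ∧ a.2 < b.2)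

lemma pv_tail_eq_map (sets : List (List Int)) :
    ∀ (f r : Nat), pvTail sets f r = (pvKeys sets f r).map (pvRowOf sets) := by
  intro f
  induction f with
  | zero => intro r; rfl
  | succ f ih => intro r; rw [pvTail, pvKeys, List.map_append, pv_rows_eq_map, ih]

lemma pv_mem_keys (sets : List (List Int)) :
    ∀ (f r : Nat) (t : Nat × Nat),
    t ∈ pvKeys sets f r ↔
      r ≤ t.1 ∧ t.1 < r + f ∧ t.2 < sets.length ∧ t.1 < (sets.getD t.2 []).length := by
  intro f
  induction f with
  | zero => intro r t; simp [pvKeys]; omega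
  | succ f ih =>
    intro r t
    rw [pvKeys, List.mem_append, pv_mem_rkeys, ih]
    constructor
    · rintro (⟨h1, h2, h3⟩ | ⟨h1, h2, h3, h4⟩)
      · exact ⟨by omega, by omega, h2, by omega⟩
      · exact ⟨by omega, by omega, h3, h4⟩
    · rintro ⟨h1, h2, h3, h4⟩
      by_cases h : t.1 = r
      · exact Or.inl ⟨h, h3, by omega⟩
      · exact Or.inr ⟨by omega, by omega, h3, h4⟩

lemma pv_mem_range_drop (L r : Nat) : r ∈ (List.range L).drop 1 ↔ 1 ≤ r ∧ r < L := by
  constructor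
  · intro h
    rcases List.mem_drop_iff_getElem.1 h with ⟨i, hi, he⟩
    rw [List.getElem_range] at he
    simp at hi
    omega
  · rintro ⟨h1, h2⟩
    cases L with
    | zero => omega
    | succ L =>
      simp only [List.range_succ_eq_map, List.drop_one, List.tail_cons, List.mem_map,
        List.mem_range]
      exact ⟨r - 1, by omega, by omega⟩

lemma pv_mem_flatkeys (sets : List (List Int)) (t : Nat × Nat) :
    t ∈ pvFlatKeys sets ↔ 1 ≤ t.1 ∧ t.2 < sets.length ∧ t.1 < (sets.getD t.2 []).length := by
  rw [pvFlatKeys, List.mem_flatMap]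
  constructor
  · rintro ⟨si, hsi, hm⟩
    rcases List.mem_map.1 hm with ⟨r, hr, he⟩
    rcases pv_mem_range_drop si.1.length r |>.1 hr with ⟨h1, h2⟩
    have hg : sets[si.2]? = some si.1 := List.mem_zipIdx_iff_getElem?.1 hsi
    have h3 : si.2 < sets.length := (List.getElem?_eq_some_iff.1 hg).1
    have h4 : sets.getD si.2 [] = si.1 := by rw [List.getD_eq_getElem?_getD, hg]; rfl
    subst he
    exact ⟨h1, h3, by rw [h4]; exact h2⟩
  · rintro ⟨h1, h2, h3⟩
    refine ⟨(sets[t.2]'h2, t.2), List.mem_zipIdx_iff_getElem?.2 (by simp), ?_⟩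
    have h4 : sets.getD t.2 [] = sets[t.2]'h2 := by
      rw [List.getD_eq_getElem?_getD, List.getElem?_eq_getElem h2]; rfl
    refine List.mem_map.2 ⟨t.1, pv_mem_range_drop _ _ |>.2 ⟨h1, by rw [h4] at h3; exact h3⟩, ?_⟩
    cases t; rfl

lemma pv_keys_pairwise (sets : List (List Int)) :
    ∀ (f r : Nat), (pvKeys sets f r).Pairwise pvLt := by
  intro f
  induction f with
  | zero => intro r; simp [pvKeys]
  | succ f ih =>
    intro r
    rw [pvKeys, List.pairwise_append]
    refine ⟨?_, ih (r+1), ?_⟩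
    · refine List.Pairwise.filterMap _ ?_ (pv_zipIdx_pairwise sets 0)
      rintro a a' hlt b hb b' hb'
      by_cases h : r < a.1.length
      · by_cases h' : r < a'.1.length
        · simp only [h, h', if_true, Option.some.injEq] at hb hb'
          subst hb; subst hb'
          exact Or.inr ⟨rfl, hlt⟩
        · simp [h'] at hb'
      · simp [h] at hb
    · intro a ha b hb
      have h1 := (pv_mem_rkeys sets r a).1 ha
      have h2 := (pv_mem_keys sets f (r+1) b).1 hb
      exact Or.inl (by omega)

lemma pv_lt_irrefl (a : Nat × Nat) : ¬ pvLt a a := by simp [pvLt]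

lemma pv_flatkeys_pairwise (sets : List (List Int)) :
    ∀ k, ((sets.zipIdx k).flatMap (fun si => ((List.range si.1.length).drop 1).map
      (fun r => (r, si.2)))).Pairwise (fun a b : Nat × Nat => a.2 < b.2 ∨ (a.2 = b.2 ∧ a.1 < b.1)) := by
  induction sets with
  | nil => intro k; simp
  | cons s ss ih =>
    intro k
    rw [List.zipIdx_cons, List.flatMap_cons, List.pairwise_append]
    refine ⟨?_, ih (k+1), ?_⟩
    · rw [List.pairwise_map]
      have hp : ((List.range (s, k).1.length).drop 1).Pairwise (· < ·) :=
        List.Pairwise.sublist (List.drop_sublist 1 _) List.pairwise_lt_range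
      exact hp.imp (fun h => Or.inr ⟨rfl, h⟩)
    · intro a ha b hb
      rcases List.mem_map.1 ha with ⟨r, _, he⟩
      rcases List.mem_flatMap.1 hb with ⟨si, hsi, hm⟩
      rcases List.mem_map.1 hm with ⟨r', _, he'⟩
      have := (List.mem_zipIdx (by exact hsi)).1
      subst he; subst he'
      simp only
      omega

lemma pv_flatkeys_nodup (sets : List (List Int)) : (pvFlatKeys sets).Nodup := by
  refine (pv_flatkeys_pairwise sets 0).imp ?_
  intro a b h
  rintro rfl
  omega

lemma pv_foldl_max_le (sets : List (List Int)) :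
    ∀ (init m : Nat),
    (List.foldl (fun m s => max m s.length) init sets ≤ m ↔
      init ≤ m ∧ ∀ s ∈ sets, s.length ≤ m) := by
  induction sets with
  | nil => intro init m; simp
  | cons a l ih =>
    intro init m
    simp only [List.foldl_cons, ih, List.mem_cons]
    constructor
    · rintro ⟨h1, h2⟩
      refine ⟨by omega, ?_⟩
      rintro s (rfl | hs)
      · omega
      · exact h2 s hs
    · rintro ⟨h1, h2⟩
      refine ⟨?_, fun s hs => h2 s (Or.inr hs)⟩
      have := h2 a (Or.inl rfl); omega

lemma pv_keys_perm_flatkeys (sets : List (List Int)) :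
    (pvKeys sets (sets.foldl (fun m s => max m s.length) 0) 1).Perm (pvFlatKeys sets) := by
  have hnd2 := pv_flatkeys_nodup sets
  have hnd1 : (pvKeys sets (sets.foldl (fun m s => max m s.length) 0) 1).Nodup := by
    refine (pv_keys_pairwise sets _ 1).imp ?_
    intro a b h
    rintro rfl
    exact pv_lt_irrefl a h
  rw [List.perm_ext_iff_of_nodup hnd1 hnd2]
  intro t
  rw [pv_mem_keys, pv_mem_flatkeys]
  constructor
  · rintro ⟨h1, _, h3, h4⟩; exact ⟨h1, h3, h4⟩
  · rintro ⟨h1, h2, h3⟩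
    refine ⟨h1, ?_, h2, h3⟩
    have hmem : sets.getD t.2 [] ∈ sets := by
      have : sets[t.2]? = some (sets[t.2]'h2) := List.getElem?_eq_getElem h2
      rw [List.getD_eq_getElem?_getD, this]
      exact List.getElem_mem h2
    have := ((pv_foldl_max_le sets 0 (sets.foldl (fun m s => max m s.length) 0)).1 (le_refl _)).2 _ hmem
    omega

lemma pv_insertBy_congr {α : Type} (p q : α → α → Bool) (x : α) :
    ∀ acc : List α, (∀ b ∈ acc, p x b = q x b) →
    PySem.List.insertBy p x acc = PySem.List.insertBy q x acc := by
  intro acc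
  induction acc with
  | nil => intro _; rfl
  | cons y ys ih =>
    intro h
    rw [PySem.List.insertBy, PySem.List.insertBy, h y (List.mem_cons_self),
      ih (fun b hb => h b (List.mem_cons_of_mem _ hb))]

lemma pv_foldl_insertBy_congr {α : Type} (p q : α → α → Bool) (S : List α)
    (h : ∀ a ∈ S, ∀ b ∈ S, p a b = q a b) :
    ∀ (xs acc : List α), (∀ a ∈ xs, a ∈ S) → (∀ a ∈ acc, a ∈ S) →
    xs.foldl (fun acc x => PySem.List.insertBy p x acc) acc =
    xs.foldl (fun acc x => PySem.List.insertBy q x acc) acc := by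
  intro xs
  induction xs with
  | nil => intro acc _ _; rfl
  | cons x xs ih =>
    intro acc hxs hacc
    have hx : x ∈ S := hxs x (List.mem_cons_self)
    rw [List.foldl_cons, List.foldl_cons,
      pv_insertBy_congr p q x acc (fun b hb => h x hx b (hacc b hb))]
    refine ih _ (fun a ha => hxs a (List.mem_cons_of_mem _ ha)) ?_
    intro a ha
    rcases (PySem.List.mem_insertBy q x a acc).1 ha with rfl | ha
    · exact hx
    · exact hacc a ha

lemma pv_enc_lt_iff (n x1 y1 x2 y2 : Nat) (h1 : y1 < n + 1) (h2 : y2 < n + 1) :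
    x1 * (n+1) + y1 < x2 * (n+1) + y2 ↔ (x1 < x2 ∨ (x1 = x2 ∧ y1 < y2)) := by
  constructor
  · intro h
    rcases lt_trichotomy x1 x2 with h' | h' | h'
    · exact Or.inl h'
    · subst h'; exact Or.inr ⟨rfl, by omega⟩
    · exfalso
      have : x2 * (n+1) + (n+1) ≤ x1 * (n+1) := by
        calc x2 * (n+1) + (n+1) = (x2+1) * (n+1) := by ring
        _ ≤ x1 * (n+1) := Nat.mul_le_mul_right _ (Nat.succ_le_of_lt h')
      omega
  · rintro (h | ⟨rfl, h⟩)
    · have : x1 * (n+1) + (n+1) ≤ x2 * (n+1) := by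
        calc x1 * (n+1) + (n+1) = (x1+1) * (n+1) := by ring
        _ ≤ x2 * (n+1) := Nat.mul_le_mul_right _ (Nat.succ_le_of_lt h)
      omega
    · omega

lemma pv_sorted2_eq_keys (sets : List (List Int)) :
    PySem.List.sorted2 (pvFlatKeys sets) (fun t => t.1) (fun t => t.2) =
      pvKeys sets (sets.foldl (fun m s => max m s.length) 0) 1 := by
  have hK : PySem.List.sorted2 (pvFlatKeys sets) (fun t => t.1) (fun t => t.2) =
      PySem.List.sorted (pvFlatKeys sets)
        (fun t : Nat × Nat => t.1 * (sets.length + 1) + t.2) := by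
    rw [PySem.List.sorted2, PySem.List.sorted_eq_foldl_insertBy]
    refine pv_foldl_insertBy_congr _ _ (pvFlatKeys sets) ?_ _ [] (fun a ha => ha) (by simp)
    intro a ha b hb
    have h1 := ((pv_mem_flatkeys sets a).1 ha).2.1
    have h2 := ((pv_mem_flatkeys sets b).1 hb).2.1
    rw [Bool.eq_iff_iff]
    simp only [Bool.false_eq_true, if_false, Bool.or_eq_true, Bool.and_eq_true,
      Bool.not_eq_true', decide_eq_true_eq, decide_eq_false_iff_not,
      pv_enc_lt_iff sets.length a.1 a.2 b.1 b.2 (by omega) (by omega)]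
    omega
  rw [hK]
  refine PySem.List.sorted_eq_of_perm_of_pairwise_lt _ _ _ (pv_keys_perm_flatkeys sets) ?_
  refine (pv_keys_pairwise sets _ 1).imp_of_mem ?_
  intro a b ha hb hlt
  have h1 := ((pv_mem_keys sets _ 1 a).1 ha).2.2.1
  have h2 := ((pv_mem_keys sets _ 1 b).1 hb).2.2.1
  exact (pv_enc_lt_iff sets.length a.1 a.2 b.1 b.2 (by omega) (by omega)).2 hlt

lemma pv_round_eq (sets : List (List Int)) (r : Nat) (_hr : 1 ≤ r) :
    ∀ (rem : List (List Int)) (k : Nat) (product : List (List Int)) (cnt : Int) (done : Bool),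
    rem = sets.drop k →
    pvARound sets rem (rem.map (fun s => min r s.length)) k product cnt done =
    (product ++ pvRows sets r k,
     cnt + (pvRows sets r k).length,
     rem.map (fun s => min (r+1) s.length),
     done && rem.all (fun s => decide (¬ (r+1 < s.length)))) := by
  intro rem
  induction rem with
  | nil =>
    intro k product cnt done hk
    simp [pvARound, pvRows, ← hk]
  | cons si rem' ih =>
    intro k product cnt done hk
    have hklt : k < sets.length := by
      by_contra h
      have h0 : sets.drop k = [] := List.drop_eq_nil_of_le (by omega)
      rw [h0] at hk
      simp at hk
    have hdrop' : rem' = sets.drop (k+1) := by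
      have := congrArg List.tail hk
      simpa [List.tail_drop] using this
    have hrows : pvRows sets r k =
        (if r < si.length then
          [(sets.map (fun s => s.headD 0)).set k (si.getD r 0)] else [])
        ++ pvRows sets r (k+1) := by
      rw [pvRows, ← hk, List.zipIdx_cons, List.filterMap_cons, pvRows, ← hdrop']
      by_cases h : r < si.length <;> simp [h]
    by_cases hcase : r < si.length
    · have hmin : min r si.length = r := by omega
      have hminp : min (r+1) si.length = r + 1 := by omega
      by_cases h2 : r + 1 < si.length
      · simp [pvARound, hmin, hcase, h2, hrows,
          ih (k+1) _ _ _ hdrop']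
        refine ⟨?_, by omega⟩
        rw [List.set_eq_take_cons_drop _ (by simpa using hklt)]
      · simp [pvARound, hmin, hcase, h2, hrows,
          ih (k+1) _ _ _ hdrop']
        refine ⟨?_, by omega, by simp [show si.length ≤ r + 1 from by omega]⟩
        rw [List.set_eq_take_cons_drop _ (by simpa using hklt)]
    · have hmin : min r si.length = si.length := by omega
      have hminp : min (r+1) si.length = si.length := by omega
      have h2 : ¬ (r + 1 < si.length) := by omega
      simp [pvARound, hmin, hminp, hcase, hrows, ih (k+1) _ _ _ hdrop']
      simp [show si.length ≤ r + 1 from by omega]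

lemma pv_init_le_foldl_add (sets : List (List Int)) :
    ∀ init : Nat, init ≤ List.foldl (fun a s => a + s.length) init sets := by
  induction sets with
  | nil => intro init; simp
  | cons a l ih => intro init; have := ih (init + a.length); simp only [List.foldl_cons]; omega

lemma pv_len_le_foldl_add (sets : List (List Int)) :
    ∀ (init : Nat) (s : List Int), s ∈ sets →
      s.length ≤ List.foldl (fun a s => a + s.length) init sets := by
  induction sets with
  | nil => simp
  | cons a l ih =>
    intro init s hs
    rcases List.mem_cons.1 hs with rfl | hs
    · have := pv_init_le_foldl_add l (init + s.length); simp only [List.foldl_cons]; omega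
    · exact ih (init + a.length) s hs

lemma pv_rows_nil (sets : List (List Int)) (r : Nat)
    (h : ∀ s ∈ sets, s.length ≤ r) : pvRows sets r 0 = [] := by
  rw [pvRows, List.filterMap_eq_nil_iff]
  intro si hsi
  have : si.1 ∈ sets := by
    have := List.fst_mem_of_mem_zipIdx (by simpa using hsi)
    simpa using this
  have := h si.1 this
  simp only [ite_eq_right_iff]
  intro hlt; omega

lemma pv_tail_nil (sets : List (List Int)) :
    ∀ (f r : Nat), (∀ s ∈ sets, s.length ≤ r) → pvTail sets f r = [] := by
  intro f
  induction f with
  | zero => intro r _; rfl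
  | succ f ih =>
    intro r h
    rw [pvTail, pv_rows_nil sets r h, ih (r+1) (fun s hs => by have := h s hs; omega)]
    rfl


lemma pv_aloop_prefix (sets : List (List Int)) (bound : Int) :
    ∀ (fa f r : Nat) (product : List (List Int)), 1 ≤ r →
    sets.foldl (fun m s => max m s.length) 0 ≤ r + f →
    sets.foldl (fun m s => max m s.length) 0 ≤ r + fa →
    (pvALoop sets bound fa product (product.length : Int) (sets.map (fun s => min r s.length)))
      <+: product ++ pvTail sets f r ∧
    (pvALoop sets bound fa product (product.length : Int) (sets.map (fun s => min r s.length))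
        = product ++ pvTail sets f r ∨
      (0 ≤ bound ∧ (bound : Int) ≤ (pvALoop sets bound fa product (product.length : Int)
        (sets.map (fun s => min r s.length))).length)) := by
  intro fa
  induction fa with
  | zero =>
    intro f r product hr hf hfa
    have htail : pvTail sets f r = [] := by
      refine pv_tail_nil sets f r ?_
      intro s hs
      have := ((pv_foldl_max_le sets 0 r).1 (by omega)).2 s hs
      omega
    rw [pvALoop, htail, List.append_nil]
    exact ⟨List.prefix_refl _, Or.inl rfl⟩
  | succ fa ih =>
    intro f r product hr hf hfa
    by_cases hC : (product.length : Int) < bound ∨ bound < 0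
    · rw [pvALoop, if_pos hC,
        pv_round_eq sets r hr sets 0 product (product.length : Int) true (by simp)]
      by_cases hdone : sets.all (fun s => decide (¬ (r+1 < s.length))) = true
      · -- the loop breaks after this round; all later rounds are empty
        have hmax : sets.foldl (fun m s => max m s.length) 0 ≤ r + 1 := by
          rw [pv_foldl_max_le]
          refine ⟨by omega, ?_⟩
          intro s hs
          have := (List.all_eq_true.1 hdone) s hs
          simp at this; omega
        simp only [hdone, Bool.true_and, if_pos]
        have hsplit : pvTail sets f r = pvRows sets r 0 := by
          cases f with
          | zero =>
            have hr0 : pvRows sets r 0 = [] := by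
              refine pv_rows_nil sets r ?_
              intro s hs
              have := ((pv_foldl_max_le sets 0 (r+0)).1 (by omega)).2 s hs
              omega
            rw [hr0]; rfl
          | succ f =>
            rw [pvTail, pv_tail_nil sets f (r+1)
              (fun s hs => by have := ((pv_foldl_max_le sets 0 (r+1)).1 hmax).2 s hs; omega),
              List.append_nil]
        rw [hsplit]
        exact ⟨List.prefix_refl _, Or.inl rfl⟩
      · -- some pointer still advances: recurse
        have hmax : ¬ (sets.foldl (fun m s => max m s.length) 0 ≤ r + 1) := by
          intro hle
          apply hdone
          rw [List.all_eq_true]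
          intro s hs
          have := ((pv_foldl_max_le sets 0 (r+1)).1 hle).2 s hs
          simp; omega
        obtain ⟨f', rfl⟩ : ∃ f', f = f' + 1 := ⟨f - 1, by omega⟩
        simp only [hdone, Bool.true_and, if_neg, Bool.false_eq_true, not_false_iff]
        have hcnt : (product.length : Int) + (pvRows sets r 0).length
            = ((product ++ pvRows sets r 0).length : Int) := by
          simp [List.length_append]
        rw [hcnt]
        have := ih f' (r+1) (product ++ pvRows sets r 0) (by omega) (by omega) (by omega)
        rw [pvTail, ← List.append_assoc]
        exact this
    · rw [pvALoop, if_neg hC]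
      refine ⟨List.prefix_append _ _, Or.inr ⟨by omega, by omega⟩⟩

-- ===== VERDICT (by name: the statement is the Claim_ definition above) =====
theorem get_product_linear_fair_spec : Claim_equal_get_product_linear_fair := by
  intro sets bound _
  unfold Spec_get_product_linear_fair get_product_linear_fair get_product_linear_fair_alt
  by_cases hemp : sets.any (fun s => s.isEmpty) = true
  · simp [hemp]
  · simp only [hemp, if_neg, Bool.false_eq_true, not_false_iff]
    have hne : ∀ s ∈ sets, 1 ≤ s.length := by
      intro s hs
      cases s with
      | nil => exact absurd (List.any_eq_true.2 ⟨[], hs, by simp⟩) hemp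
      | cons a t => simp
    have hptrs : sets.map (fun _ => (1 : Nat)) = sets.map (fun s => min 1 s.length) := by
      apply List.map_congr_left
      intro s hs
      have := hne s hs; omega
    have h1 : ((([sets.map (fun s => s.headD 0)]).length : Nat) : Int) = 1 := by simp
    have hfa : sets.foldl (fun m s => max m s.length) 0
        ≤ 1 + (sets.foldl (fun a s => a + s.length) 0 + 1) := by
      rw [pv_foldl_max_le]
      refine ⟨by omega, ?_⟩
      intro s hs
      have := pv_len_le_foldl_add sets 0 s hs; omega
    rw [hptrs, ← h1]
    rw [PySem.List.foldl_append_singleton_eq_map]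
    have hflat : (sets.zipIdx.flatMap fun si =>
        ((List.range si.1.length).drop 1).map (fun r => (r, si.2))) = pvFlatKeys sets := rfl
    rw [hflat, pv_sorted2_eq_keys]
    have hrow : (fun t : Nat × Nat => (sets.map (fun s => s.headD 0)).set t.2
        ((sets.getD t.2 []).getD t.1 0)) = pvRowOf sets := rfl
    rw [hrow]
    obtain ⟨hpre, hdisj⟩ := pv_aloop_prefix sets bound
      (sets.foldl (fun a s => a + s.length) 0 + 1)
      (sets.foldl (fun m s => max m s.length) 0) 1
      [sets.map (fun s => s.headD 0)] (by omega) (by omega) hfa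
    set res := pvALoop sets bound (sets.foldl (fun a s => a + s.length) 0 + 1)
      [sets.map (fun s => s.headD 0)]
      (([sets.map (fun s => s.headD 0)].length : Nat) : Int)
      (sets.map (fun s => min 1 s.length)) with hres
    set T := pvTail sets (sets.foldl (fun m s => max m s.length) 0) 1 with hT
    have hTm : (pvKeys sets (sets.foldl (fun m s => max m s.length) 0) 1).map (pvRowOf sets)
        = T := (pv_tail_eq_map sets _ 1).symm
    rcases lt_trichotomy bound 0 with hb | hb | hb
    · -- bound < 0 : A runs to completion, B takes everything
      have hres_full : res = [sets.map (fun s => s.headD 0)] ++ T := by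
        rcases hdisj with h | ⟨h0, _⟩
        · exact h
        · omega
      have hna : ¬ (bound > 0 ∧ ((res.length : Int) > bound)) := by omega
      rw [if_neg hna, if_pos hb, List.take_length, hTm, hres_full]
    · -- bound = 0 : A's loop never runs, B takes nothing
      subst hb
      have hres0 : res = [sets.map (fun s => s.headD 0)] := by
        rw [hres, pvALoop, if_neg (by simp)]
      have hna : ¬ ((0:Int) > 0 ∧ ((res.length : Int) > 0)) := by omega
      have hnb : ¬ ((0:Int) < 0) := by omega
      rw [if_neg hna, if_neg hnb, hres0, h1]
      simp
    · -- bound ≥ 1 : both sides are the first `bound` rows of the full list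
      have hnb : ¬ (bound < 0) := by omega
      rw [if_neg hnb, h1, List.map_take, hTm]
      have hBfull : [sets.map (fun s => s.headD 0)] ++ T.take (bound - 1).toNat
          = ([sets.map (fun s => s.headD 0)] ++ T).take bound.toNat := by
        rw [List.take_append]
        congr 1
        · rw [List.take_of_length_le (by simp; omega)]
        · congr 1
          omega
      rw [hBfull]
      rcases hdisj with hfull | ⟨_, hlen⟩
      · rw [hfull]
        by_cases hcond : bound > 0 ∧ ((([sets.map (fun s => s.headD 0)] ++ T).length : Int) > bound)
        · rw [if_pos hcond]
        · rw [if_neg hcond, List.take_of_length_le (by omega)]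
      · obtain ⟨t, ht⟩ := hpre
        have htake : ([sets.map (fun s => s.headD 0)] ++ T).take bound.toNat
            = res.take bound.toNat := by
          rw [← ht, List.take_append, show bound.toNat - res.length = 0 by omega]
          simp
        rw [htake]
        by_cases hcond : bound > 0 ∧ ((res.length : Int) > bound)
        · rw [if_pos hcond]
        · rw [if_neg hcond]
          have : res.length = bound.toNat := by omega
          rw [← this, List.take_length]
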